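-- pv_equiv track=rewrite | github.com/mikeee-anderson/COMPSCI-101 | COMPSCI-101/CS101/Lab 12/Question 5.py | carry_out_transactions
-- ===== SOURCE A (Python) =====
-- def carry_out_transactions(balance, transactions_tuple):
--     withdrawls = 0
--     deposits = 0
--     for value in transactions_tuple:
--         if value < 0:
--             balance += value
--             withdrawls += abs(value)
--         else:
--             balance += value
--             deposits += value
--     tuple1 = (balance, deposits, withdrawls)
--     return tuple1
-- ===== SOURCE B (Python) =====
-- def carry_out_transactions(balance, transactions_tuple):
--     # deposits + withdrawls = sum of magnitudes, deposits - withdrawls = net total,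
--     # so both are recovered arithmetically without classifying any element by sign.
--     total = sum(transactions_tuple)
--     magnitude = sum(map(abs, transactions_tuple))
--     return (balance + total, (magnitude + total) // 2, (magnitude - total) // 2)
-- ===== Notes on version B (the rewrite author's own statement) =====
-- stated objective: alternative
-- what changed: Drops the sign-branching classification loop entirely: B aggregates only the net total and the total magnitude, then recovers deposits and withdrawals by the linear-algebraic identities deposits=(magnitude+total)/2 and withdrawals=(magnitude-total)/2.
import Mathlib
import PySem

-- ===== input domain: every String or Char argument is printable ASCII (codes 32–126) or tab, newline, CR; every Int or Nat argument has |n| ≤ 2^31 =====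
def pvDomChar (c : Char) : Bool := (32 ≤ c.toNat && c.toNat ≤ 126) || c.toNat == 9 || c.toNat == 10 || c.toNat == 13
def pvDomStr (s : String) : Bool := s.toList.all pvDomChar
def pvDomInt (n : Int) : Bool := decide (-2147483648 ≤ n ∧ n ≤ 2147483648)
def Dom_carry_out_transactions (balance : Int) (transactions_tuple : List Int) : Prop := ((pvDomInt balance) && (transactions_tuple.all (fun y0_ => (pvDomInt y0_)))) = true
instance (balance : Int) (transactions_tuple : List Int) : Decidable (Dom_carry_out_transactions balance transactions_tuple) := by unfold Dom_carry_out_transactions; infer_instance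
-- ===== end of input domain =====

-- B drops A's sign-branching loop: it sums only the net total and the total magnitude
-- and recovers deposits/withdrawals by an arithmetic identity (alternative algorithm, same cost).

-- ===== PORT A =====
-- one loop carrying (balance, deposits, withdrawls); stepA is the loop body
def stepA (st : Int × Int × Int) (value : Int) : Int × Int × Int :=
  if value < 0 then (st.1 + value, st.2.1, st.2.2 + value.natAbs)
  else (st.1 + value, st.2.1 + value, st.2.2)

def carry_out_transactions (balance : Int) (transactions_tuple : List Int) : Int × Int × Int :=
  let s := transactions_tuple.foldl stepA (balance, 0, 0)
  (s.1, s.2.1, s.2.2)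

-- ===== PORT B =====
def carry_out_transactions_alt (balance : Int) (transactions_tuple : List Int) : Int × Int × Int :=
  let total := transactions_tuple.sum
  let magnitude := (transactions_tuple.map (fun v => (v.natAbs : Int))).sum
  (balance + total, PySem.Int.floordiv (magnitude + total) 2, PySem.Int.floordiv (magnitude - total) 2)

-- ===== PRECONDITION & SPEC =====
def Spec_carry_out_transactions (balance : Int) (transactions_tuple : List Int) (out : Int × Int × Int) : Prop := out = carry_out_transactions_alt balance transactions_tuple
instance (balance : Int) (transactions_tuple : List Int) (out : Int × Int × Int) : Decidable (Spec_carry_out_transactions balance transactions_tuple out) := by unfold Spec_carry_out_transactions; infer_instance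

-- ===== CLAIM (what is proved, stated in full; the proofs are below) =====
def Claim_equal_carry_out_transactions : Prop := ∀ (balance : Int) (transactions_tuple : List Int), Dom_carry_out_transactions balance transactions_tuple → Spec_carry_out_transactions balance transactions_tuple (carry_out_transactions balance transactions_tuple)

-- ===== LEMMAS AND PROOFS =====
-- A's fold characterised: balance + net sum, deposits = doubled are magnitude + sum, etc.,
-- stated directly in the form B computes: 2*deposits = magnitude + sum, 2*withdrawls = magnitude - sum.
theorem stepA_foldl (ts : List Int) (b d w : Int) :
    ts.foldl stepA (b, d, w)
    = (b + ts.sum,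
       d + PySem.Int.floordiv ((ts.map (fun v => (v.natAbs : Int))).sum + ts.sum) 2,
       w + PySem.Int.floordiv ((ts.map (fun v => (v.natAbs : Int))).sum - ts.sum) 2) := by
  induction ts generalizing b d w with
  | nil => simp [PySem.Int.floordiv]
  | cons x xs ih =>
    have hfd : ∀ a : Int, PySem.Int.floordiv a 2 = a / 2 :=
      fun a => PySem.Int.floordiv_eq_ediv_of_pos (by omega)
    simp only [List.foldl_cons, List.map_cons, List.sum_cons]
    by_cases h : x < 0
    · rw [show stepA (b, d, w) x = (b + x, d, w + x.natAbs) from by simp [stepA, h], ih]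
      simp only [Prod.mk.injEq, hfd]
      refine ⟨by ring, by omega, by omega⟩
    · rw [show stepA (b, d, w) x = (b + x, d + x, w) from by simp [stepA, h], ih]
      simp only [Prod.mk.injEq, hfd]
      refine ⟨by ring, by omega, by omega⟩

-- ===== VERDICT (by name: the statement is the Claim_ definition above) =====
theorem carry_out_transactions_spec : Claim_equal_carry_out_transactions := by
  intro balance ts _
  show _ = _
  simp [carry_out_transactions, carry_out_transactions_alt, stepA_foldl]
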